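-- pv_equiv track=rewrite | github.com/MolEvolEpid/ray-summer-phylogeny-practice | likelihood_distribution.py | count_faces
-- ===== SOURCE A (Python) =====
-- def count_faces(string):
-- 	"""
-- 	Given a string of space-separated letters, count
-- 	the number of times"H" and "T" occur
-- 	"""
-- 	heads = tails = 0
-- 	for face in string.split():
-- 		if face.lower() == "h":
-- 			heads += 1
-- 		elif face.lower() == "t":
-- 			tails += 1
-- 	return heads, tails
-- ===== SOURCE B (Python) =====
-- def count_faces(string):
--     heads = tails = 0
--     state = None  # None: between tokens; 'h'/'t': token so far is exactly one H/T; 'x': any other token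
--     for c in string:
--         if c.isspace():
--             if state == 'h':
--                 heads += 1
--             elif state == 't':
--                 tails += 1
--             state = None
--         elif state is None:
--             if c in 'hH':
--                 state = 'h'
--             elif c in 'tT':
--                 state = 't'
--             else:
--                 state = 'x'
--         else:
--             state = 'x'
--     if state == 'h':
--         heads += 1
--     elif state == 't':
--         tails += 1
--     return heads, tails
-- ===== Notes on version B (the rewrite author's own statement) =====
-- stated objective: alternative
-- what changed: Replaces tokenize-then-classify (split the string into a token list, branch on each token's lowercase) with a single character-level DFA that never materialises tokens: it tracks whether the current run of non-space characters is exactly one H/T and flushes a count at each whitespace boundary and at the end.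
import Mathlib
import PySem

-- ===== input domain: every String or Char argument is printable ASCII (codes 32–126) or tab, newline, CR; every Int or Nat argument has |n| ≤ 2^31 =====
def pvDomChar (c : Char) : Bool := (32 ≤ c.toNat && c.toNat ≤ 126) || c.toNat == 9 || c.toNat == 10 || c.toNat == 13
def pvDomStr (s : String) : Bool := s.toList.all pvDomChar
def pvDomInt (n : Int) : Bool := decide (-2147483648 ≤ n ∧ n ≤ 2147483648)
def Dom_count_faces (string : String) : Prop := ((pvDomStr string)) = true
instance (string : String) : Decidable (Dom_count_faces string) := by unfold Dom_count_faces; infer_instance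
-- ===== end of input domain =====

-- B replaces A's tokenize-then-classify (split, then branch on each token's lowercase) with a
-- single character-level DFA that never materialises tokens (objective: alternative).

-- ===== PORT A =====
def count_faces (string : String) : Int × Int :=
  (PySem.Str.split₀ string).foldl
    (fun (p : Int × Int) face =>
      if PySem.Str.lower face == "h" then (p.1 + 1, p.2)
      else if PySem.Str.lower face == "t" then (p.1, p.2 + 1)
      else p)
    (0, 0)

-- ===== PORT B =====
-- state: none = between tokens; some 'h' / some 't' = current token is exactly one H / one T;
-- some 'x' = current token already disqualified
def cfStep (acc : Int × Int × Option Char) (c : Char) : Int × Int × Option Char :=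
  if PySem.Chars.isspace c then
    if acc.2.2 = some 'h' then (acc.1 + 1, acc.2.1, none)
    else if acc.2.2 = some 't' then (acc.1, acc.2.1 + 1, none)
    else (acc.1, acc.2.1, none)
  else
    match acc.2.2 with
    | none =>
        if c = 'h' ∨ c = 'H' then (acc.1, acc.2.1, some 'h')
        else if c = 't' ∨ c = 'T' then (acc.1, acc.2.1, some 't')
        else (acc.1, acc.2.1, some 'x')
    | some _ => (acc.1, acc.2.1, some 'x')

def count_faces_alt (string : String) : Int × Int :=
  let r := string.toList.foldl cfStep (0, 0, none)
  if r.2.2 = some 'h' then (r.1 + 1, r.2.1)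
  else if r.2.2 = some 't' then (r.1, r.2.1 + 1)
  else (r.1, r.2.1)

-- ===== PRECONDITION & SPEC =====
def Spec_count_faces (string : String) (out : Int × Int) : Prop := out = count_faces_alt string
instance (string : String) (out : Int × Int) : Decidable (Spec_count_faces string out) := by unfold Spec_count_faces; infer_instance

-- ===== CLAIM (what is proved, stated in full; the proofs are below) =====
def Claim_equal_count_faces : Prop := ∀ (string : String), Dom_count_faces string → Spec_count_faces string (count_faces string)

-- ===== LEMMAS AND PROOFS =====

-- A's per-token step, on char lists
def gA (p : Int × Int) (tok : List Char) : Int × Int :=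
  if PySem.Chars.lower tok = ['h'] then (p.1 + 1, p.2)
  else if PySem.Chars.lower tok = ['t'] then (p.1, p.2 + 1)
  else p

-- the DFA state corresponding to a partially read token (stored reversed, like split₀.go's cur)
def stOf (cur : List Char) : Option Char :=
  match cur with
  | [] => none
  | [c] =>
      if c = 'h' ∨ c = 'H' then some 'h'
      else if c = 't' ∨ c = 'T' then some 't'
      else some 'x'
  | _ :: _ :: _ => some 'x'

-- the end-of-token flush
def flush (h t : Int) (st : Option Char) : Int × Int :=
  if st = some 'h' then (h + 1, t)
  else if st = some 't' then (h, t + 1)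
  else (h, t)

theorem char_toNat_inj (a b : Char) (h : a.toNat = b.toNat) : a = b :=
  Char.ext (by exact UInt32.toNat_inj.mp h)

theorem lowerChar_eq_h (c : Char) :
    (PySem.Chars.lowerChar c = 'h') ↔ (c = 'h' ∨ c = 'H') := by
  unfold PySem.Chars.lowerChar
  by_cases hu : PySem.Chars.isupper c = true
  · simp only [hu, if_true]
    simp only [PySem.Chars.isupper, Bool.and_eq_true, decide_eq_true_eq, Char.le_def] at hu
    have h1 : 65 ≤ c.toNat := hu.1
    have h2 : c.toNat ≤ 90 := hu.2
    have hval : (Char.ofNat (c.toNat + 32)).toNat = c.toNat + 32 := by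
      rw [Char.toNat_ofNat, if_pos]; left; omega
    constructor
    · intro he
      have h3 : c.toNat + 32 = 104 := by
        rw [← hval, he]; decide
      right
      have h4 : 'H'.toNat = 72 := by decide
      exact char_toNat_inj c 'H' (by omega)
    · rintro (rfl | rfl)
      · exact absurd h2 (by decide)
      · decide
  · rw [if_neg hu]
    constructor
    · intro he; exact Or.inl he
    · rintro (rfl | rfl)
      · rfl
      · exact absurd (by decide : PySem.Chars.isupper 'H' = true) hu

theorem lowerChar_eq_t (c : Char) :
    (PySem.Chars.lowerChar c = 't') ↔ (c = 't' ∨ c = 'T') := by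
  unfold PySem.Chars.lowerChar
  by_cases hu : PySem.Chars.isupper c = true
  · simp only [hu, if_true]
    simp only [PySem.Chars.isupper, Bool.and_eq_true, decide_eq_true_eq, Char.le_def] at hu
    have h1 : 65 ≤ c.toNat := hu.1
    have h2 : c.toNat ≤ 90 := hu.2
    have hval : (Char.ofNat (c.toNat + 32)).toNat = c.toNat + 32 := by
      rw [Char.toNat_ofNat, if_pos]; left; omega
    constructor
    · intro he
      have h3 : c.toNat + 32 = 116 := by
        rw [← hval, he]; decide
      right
      have h4 : 'T'.toNat = 84 := by decide
      exact char_toNat_inj c 'T' (by omega)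
    · rintro (rfl | rfl)
      · exact absurd h2 (by decide)
      · decide
  · rw [if_neg hu]
    constructor
    · intro he; exact Or.inl he
    · rintro (rfl | rfl)
      · rfl
      · exact absurd (by decide : PySem.Chars.isupper 'T' = true) hu

-- flushing the DFA state of a (reversed) token equals A's classification of the token
theorem flush_stOf (cur : List Char) (h t : Int) :
    flush h t (stOf cur) = gA (h, t) cur.reverse := by
  match cur with
  | [] => simp [flush, stOf, gA, PySem.Chars.lower]
  | [c] =>
      simp only [stOf, List.reverse_singleton, gA]
      have hl : PySem.Chars.lower [c] = [PySem.Chars.lowerChar c] := by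
        simp [PySem.Chars.lower]
      rw [hl]
      by_cases hh : c = 'h' ∨ c = 'H'
      · rw [if_pos hh]
        have : PySem.Chars.lowerChar c = 'h' := (lowerChar_eq_h c).mpr hh
        simp [flush, this]
      · rw [if_neg hh]
        have hne : PySem.Chars.lowerChar c ≠ 'h' := fun he => hh ((lowerChar_eq_h c).mp he)
        by_cases ht : c = 't' ∨ c = 'T'
        · rw [if_pos ht]
          have : PySem.Chars.lowerChar c = 't' := (lowerChar_eq_t c).mpr ht
          simp [flush, this]
        · rw [if_neg ht]
          have hnt : PySem.Chars.lowerChar c ≠ 't' := fun he => ht ((lowerChar_eq_t c).mp he)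
          simp [flush, hne, hnt]
  | c0 :: c1 :: cs =>
      have hlen : ∀ (l : List Char), (PySem.Chars.lower l).length = l.length := by
        intro l; simp [PySem.Chars.lower]
      have hne : ∀ (d : Char), PySem.Chars.lower ((c0 :: c1 :: cs).reverse) ≠ [d] := by
        intro d he
        have := congrArg List.length he
        rw [hlen] at this
        simp at this
      simp only [stOf, gA, if_neg (hne 'h'), if_neg (hne 't')]
      simp [flush]

-- split₀.go prepends its accumulator (reversed) to the tokens of the rest
theorem go_acc (s : List Char) (cur : List Char) (acc : List (List Char)) :
    PySem.Chars.split₀.go s cur acc = acc.reverse ++ PySem.Chars.split₀.go s cur [] := by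
  induction s generalizing cur acc with
  | nil =>
      simp only [PySem.Chars.split₀.go]
      by_cases h : cur.isEmpty = true
      · simp [h]
      · simp [h]
  | cons c rest ih =>
      simp only [PySem.Chars.split₀.go]
      by_cases hs : PySem.Chars.isspace c = true
      · simp only [hs, if_true]
        by_cases h : cur.isEmpty = true
        · simp only [h, if_true]
          exact ih [] acc
        · simp only [h]
          rw [ih [] (cur.reverse :: acc), ih [] [cur.reverse]]
          simp
      · simp only [hs, Bool.false_eq_true, if_false]
        exact ih (c :: cur) acc

-- main invariant: running the DFA from the state of a partial (reversed) token and flushing at the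
-- end equals folding A's token step over the tokens split₀.go produces
theorem dfa_eq_go (s : List Char) (cur : List Char) (h t : Int) :
    (let r := s.foldl cfStep (h, t, stOf cur)
     flush r.1 r.2.1 r.2.2)
      = (PySem.Chars.split₀.go s cur []).foldl gA (h, t) := by
  induction s generalizing cur h t with
  | nil =>
      simp only [List.foldl_nil, PySem.Chars.split₀.go]
      by_cases he : cur.isEmpty = true
      · rw [List.isEmpty_iff.mp he]
        simp [stOf, flush]
      · simp only [he, Bool.false_eq_true, if_false, List.reverse_cons, List.reverse_nil,
          List.nil_append, List.foldl_cons, List.foldl_nil]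
        exact flush_stOf cur h t
  | cons c rest ih =>
      simp only [List.foldl_cons, PySem.Chars.split₀.go]
      by_cases hs : PySem.Chars.isspace c = true
      · simp only [hs, if_true]
        have hstep : cfStep (h, t, stOf cur) c =
            ((gA (h, t) cur.reverse).1, (gA (h, t) cur.reverse).2, none) := by
          have := flush_stOf cur h t
          simp only [cfStep, hs, if_true]
          rw [← this]
          simp only [flush]
          split_ifs <;> rfl
        rw [hstep]
        by_cases he : cur.isEmpty = true
        · have hc : cur = [] := List.isEmpty_iff.mp he
          subst hc
          simp only [List.isEmpty_nil, if_true]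
          have hg : gA (h, t) ([] : List Char).reverse = (h, t) := by
            simp [gA, PySem.Chars.lower]
          have := ih [] h t
          simp only [stOf] at this
          simpa [hg] using this
        · simp only [he, Bool.false_eq_true, if_false]
          rw [go_acc rest [] [cur.reverse]]
          simp only [List.reverse_cons, List.reverse_nil, List.nil_append]
          have := ih [] (gA (h, t) cur.reverse).1 (gA (h, t) cur.reverse).2
          simpa [stOf] using this
      · simp only [hs, Bool.false_eq_true, if_false]
        have hstep : cfStep (h, t, stOf cur) c = (h, t, stOf (c :: cur)) := by
          simp only [cfStep, hs, Bool.false_eq_true, if_false]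
          match cur with
          | [] => simp only [stOf]; split_ifs <;> rfl
          | d :: ds =>
              match ds with
              | [] => simp only [stOf]; split_ifs <;> rfl
              | _ :: _ => simp [stOf]
        rw [hstep]
        exact ih (c :: cur) h t

-- ===== VERDICT (by name: the statement is the Claim_ definition above) =====
theorem count_faces_spec : Claim_equal_count_faces := by
  intro s _
  unfold Spec_count_faces count_faces count_faces_alt
  -- A's fold over String tokens = the fold of gA over Chars.split₀
  have hA :
      (PySem.Str.split₀ s).foldl
        (fun (p : Int × Int) face =>
          if PySem.Str.lower face == "h" then (p.1 + 1, p.2)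
          else if PySem.Str.lower face == "t" then (p.1, p.2 + 1)
          else p) (0, 0)
      = (PySem.Chars.split₀ s.toList).foldl gA (0, 0) := by
    rw [← PySem.Str.split₀_map_toList, List.foldl_map]
    apply PySem.List.foldl_congr_mem
    intro p face _
    have h1 : (PySem.Str.lower face == "h") = decide (PySem.Chars.lower face.toList = ['h']) := by
      rw [Bool.eq_iff_iff, ← PySem.Str.toList_lower]
      simp [← String.toList_inj]
    have h2 : (PySem.Str.lower face == "t") = decide (PySem.Chars.lower face.toList = ['t']) := by
      rw [Bool.eq_iff_iff, ← PySem.Str.toList_lower]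
      simp [← String.toList_inj]
    rw [h1, h2]
    simp only [gA, decide_eq_true_eq]
  rw [hA]
  have := dfa_eq_go s.toList [] 0 0
  simp only [stOf] at this
  rw [PySem.Chars.split₀, ← this]
  simp only [flush]
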